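-- pv_equiv track=rewrite | github.com/miniSlavik-1/PaboTa | Python/18.12.2024/tests3/t9.py | t9
-- ===== SOURCE A (Python) =====
-- def t9(text):
--     text2 = ""
--     for i in text:
--         if i == "," or i == ".":
--             text2 += " " + i + " "
--         else:
--             text2 += i
--     list = text2.split()
--     for i in range(len(list)):
--         if i == 0 or list[i - 1] == ".":
--             list[i] = list[i].capitalize()
--     for i in range(len(list)):
--         if i != 0 and list[i] != "." and list[i] != ",":
--             list[i] = " " + list[i]
--     res = "".join(list)
--     return res
-- ===== SOURCE B (Python) =====
-- def t9(text):
--     # one char-level pass builds the token list directly (no padded copy, no split)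
--     tokens = []
--     cur = ''
--     for c in text:
--         if c.isspace():
--             if cur:
--                 tokens.append(cur)
--                 cur = ''
--         elif c == '.' or c == ',':
--             if cur:
--                 tokens.append(cur)
--                 cur = ''
--             tokens.append(c)
--         else:
--             cur += c
--     if cur:
--         tokens.append(cur)
--     # one token-level pass emits the result, tracking the previous token
--     parts = []
--     prev = None
--     for tok in tokens:
--         word = tok.capitalize() if (prev is None or prev == '.') else tok
--         if prev is not None and tok != '.' and tok != ',':
--             parts.append(' ')
--         parts.append(word)
--         prev = tok
--     return ''.join(parts)
-- ===== Notes on version B (the rewrite author's own statement) =====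
-- stated objective: simpler
-- what changed: A builds a space-padded copy of the text, splits it, and runs two index-based mutation passes over the token list before joining; B tokenizes the text directly in one character-level pass (words and '.'/',' tokens) and emits the result in one token-level pass that tracks the previous token, with no padded copy and no in-place index passes.
import Mathlib
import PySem

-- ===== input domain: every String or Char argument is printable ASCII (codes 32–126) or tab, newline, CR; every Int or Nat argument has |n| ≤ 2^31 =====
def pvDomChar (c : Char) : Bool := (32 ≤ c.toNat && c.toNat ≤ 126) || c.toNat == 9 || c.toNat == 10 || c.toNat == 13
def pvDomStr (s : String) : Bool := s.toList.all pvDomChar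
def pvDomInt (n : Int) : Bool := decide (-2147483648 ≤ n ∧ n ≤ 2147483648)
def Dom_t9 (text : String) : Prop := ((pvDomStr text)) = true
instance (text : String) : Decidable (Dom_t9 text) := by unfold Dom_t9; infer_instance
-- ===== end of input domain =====

-- B replaces A's pad-then-split-then-two-index-passes pipeline by one char-level
-- tokenizing pass and one token-level emitting pass (objective: simpler).

-- shared port of Python's str.capitalize (exact on ASCII: titlecase = uppercase there)
def pyCapitalize (t : List Char) : List Char :=
  match t with
  | [] => []
  | c :: cs => PySem.Chars.upperChar c :: cs.map PySem.Chars.lowerChar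

-- ===== PORT A =====
def t9PadStep (acc : List Char) (c : Char) : List Char :=
  if c = ',' ∨ c = '.' then acc ++ ([' '] ++ [c] ++ [' ']) else acc ++ [c]

def t9Pass1Step (l : List (List Char)) (i : Int) : List (List Char) :=
  if i = 0 ∨ PySem.List.pyGetD l (i - 1) [] = ['.'] then
    PySem.List.pySetD l i (pyCapitalize (PySem.List.pyGetD l i []))
  else l

def t9Pass2Step (l : List (List Char)) (i : Int) : List (List Char) :=
  if i ≠ 0 ∧ PySem.List.pyGetD l i [] ≠ ['.'] ∧ PySem.List.pyGetD l i [] ≠ [','] then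
    PySem.List.pySetD l i (' ' :: PySem.List.pyGetD l i [])
  else l

def t9Core (cs : List Char) : List Char :=
  let text2 := cs.foldl t9PadStep []
  let l := PySem.Chars.split₀ text2
  let l1 := (PySem.List.pyRange 0 (PySem.List.len l) 1).foldl t9Pass1Step l
  let l2 := (PySem.List.pyRange 0 (PySem.List.len l1) 1).foldl t9Pass2Step l1
  PySem.Chars.join [] l2

def t9 (text : String) : String := String.ofList (t9Core text.toList)

-- ===== PORT B =====
def t9TokStep (st : List (List Char) × List Char) (c : Char) : List (List Char) × List Char :=
  if PySem.Chars.isspace c then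
    (if st.2 ≠ [] then st.1 ++ [st.2] else st.1, [])
  else if c = '.' ∨ c = ',' then
    ((if st.2 ≠ [] then st.1 ++ [st.2] else st.1) ++ [[c]], [])
  else (st.1, st.2 ++ [c])

def t9EmitStep (st : List (List Char) × Option (List Char)) (tok : List Char) :
    List (List Char) × Option (List Char) :=
  let word := if st.2 = none ∨ st.2 = some ['.'] then pyCapitalize tok else tok
  let parts := if st.2 ≠ none ∧ tok ≠ ['.'] ∧ tok ≠ [','] then st.1 ++ [[' ']] else st.1
  (parts ++ [word], some tok)

def t9AltCore (cs : List Char) : List Char :=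
  let st := cs.foldl t9TokStep ([], [])
  let tokens := if st.2 ≠ [] then st.1 ++ [st.2] else st.1
  PySem.Chars.join [] (tokens.foldl t9EmitStep ([], none)).1

def t9_alt (text : String) : String := String.ofList (t9AltCore text.toList)

-- ===== PRECONDITION & SPEC =====
def Spec_t9 (text : String) (out : String) : Prop := out = t9_alt text
instance (text : String) (out : String) : Decidable (Spec_t9 text out) := by unfold Spec_t9; infer_instance

-- ===== CLAIM (what is proved, stated in full; the proofs are below) =====
def Claim_equal_t9 : Prop := ∀ (text : String), Dom_t9 text → Spec_t9 text (t9 text)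

-- ===== LEMMAS AND PROOFS =====

-- per-character padding of A's first loop
def padc (c : Char) : List Char := if c = ',' ∨ c = '.' then [' ', c, ' '] else [c]

-- recursive form of B's tokenizing loop
def tokRun : List Char → List Char → List (List Char)
  | [], cur => if cur ≠ [] then [cur] else []
  | c :: cs, cur =>
    if PySem.Chars.isspace c then (if cur ≠ [] then [cur] else []) ++ tokRun cs []
    else if c = '.' ∨ c = ',' then (if cur ≠ [] then [cur] else []) ++ [c] :: tokRun cs []
    else tokRun cs (cur ++ [c])

-- recursive form of A's first index pass (b = "capitalize this token")
def capPass : Bool → List (List Char) → List (List Char)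
  | _, [] => []
  | b, t :: ts => (if b then pyCapitalize t else t) :: capPass (decide (t = ['.'])) ts

-- recursive form of A's second index pass (first = "this is token 0")
def spacePass : Bool → List (List Char) → List (List Char)
  | _, [] => []
  | first, t :: ts =>
      (if first = false ∧ t ≠ ['.'] ∧ t ≠ [','] then ' ' :: t else t) :: spacePass false ts

-- recursive form of B's emitting loop
def emitG : Bool → Bool → List (List Char) → List (List Char)
  | _, _, [] => []
  | first, b, t :: ts =>
      (if first = false ∧ t ≠ ['.'] ∧ t ≠ [','] then [[' ']] else []) ++
        (if b then pyCapitalize t else t) :: emitG false (decide (t = ['.'])) ts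

theorem char_toNat_ofNat (n : Nat) (h : Nat.isValidChar n) : (Char.ofNat n).toNat = n := by
  simp [Char.ofNat, h]

theorem char_le_toNat {a c : Char} (h : a ≤ c) : a.toNat ≤ c.toNat := by
  rw [Char.le_def] at h
  exact UInt32.le_iff_toNat_le.mp h

theorem upperChar_eq_punct {c p : Char} (hp : p = '.' ∨ p = ',')
    (h : PySem.Chars.upperChar c = p) : c = p := by
  by_cases hl : PySem.Chars.islower c = true
  · exfalso
    simp [PySem.Chars.upperChar, hl] at h
    simp [PySem.Chars.islower] at hl
    have h1 : (97:Nat) ≤ c.toNat := char_le_toNat hl.1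
    have h2 : c.toNat ≤ 122 := char_le_toNat hl.2
    have hv : Nat.isValidChar (c.toNat - 32) := by left; omega
    have := congrArg Char.toNat h
    rw [char_toNat_ofNat _ hv] at this
    have hd : ('.' : Char).toNat = 46 := by decide
    have hc : (',' : Char).toNat = 44 := by decide
    rcases hp with hp | hp <;> subst hp <;> omega
  · simpa [PySem.Chars.upperChar, hl] using h

-- capitalize maps a token to a one-char punctuation token only from that same token
theorem cap_eq_punct_iff (t : List Char) (p : Char) (hp : p = '.' ∨ p = ',') :
    (pyCapitalize t = [p]) ↔ t = [p] := by
  constructor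
  · intro h
    match t, h with
    | c :: cs, h =>
      simp [pyCapitalize] at h
      obtain ⟨h1, h2⟩ := h
      simp [upperChar_eq_punct hp h1, h2]
  · rintro rfl
    have : PySem.Chars.upperChar p = p := by
      rcases hp with hp | hp <;> subst hp <;> decide
    simp [pyCapitalize, this]

theorem cap_cond_punct (b : Bool) (t : List Char) (p : Char) (hp : p = '.' ∨ p = ',') :
    ((if b then pyCapitalize t else t) = [p]) ↔ t = [p] := by
  cases b <;> simp [cap_eq_punct_iff t p hp]

theorem pad_eq (cs : List Char) (acc : List Char) :
    cs.foldl t9PadStep acc = acc ++ cs.flatMap padc := by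
  have : t9PadStep = fun acc c => acc ++ padc c := by
    funext a c
    by_cases h : c = ',' ∨ c = '.' <;> simp [t9PadStep, padc, h]
  rw [this, PySem.List.foldl_append_eq_flatMap]

theorem go_tok (cs : List Char) (cur : List Char) (acc : List (List Char)) :
    PySem.Chars.split₀.go (cs.flatMap padc) cur acc = acc.reverse ++ tokRun cs cur.reverse := by
  induction cs generalizing cur acc with
  | nil =>
    cases cur with
    | nil => simp [PySem.Chars.split₀.go, tokRun]
    | cons a as => simp [PySem.Chars.split₀.go, tokRun]
  | cons c cs ih =>
    by_cases hs : PySem.Chars.isspace c = true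
    · have hp : ¬ (c = ',' ∨ c = '.') := by
        rintro (rfl | rfl) <;> simp_all [PySem.Chars.isspace]
      cases cur with
      | nil => simp [padc, hp, PySem.Chars.split₀.go, hs, tokRun, ih]
      | cons a as => simp [padc, hp, PySem.Chars.split₀.go, hs, tokRun, ih]
    · by_cases hp : c = ',' ∨ c = '.'
      · have hp' : c = '.' ∨ c = ',' := hp.symm
        have hsp : PySem.Chars.isspace ' ' = true := by decide
        cases cur with
        | nil =>
          simp [padc, hp, List.flatMap_cons]
          rw [PySem.Chars.split₀.go.eq_def]
          simp [hsp]
          rw [PySem.Chars.split₀.go.eq_def]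
          simp [hs]
          rw [PySem.Chars.split₀.go.eq_def]
          simp [hsp, ih, tokRun, hs, hp']
        | cons a as =>
          simp [padc, hp, List.flatMap_cons]
          rw [PySem.Chars.split₀.go.eq_def]
          simp [hsp]
          rw [PySem.Chars.split₀.go.eq_def]
          simp [hs]
          rw [PySem.Chars.split₀.go.eq_def]
          simp [hsp, ih, tokRun, hs, hp']
      · have hp' : ¬ (c = '.' ∨ c = ',') := fun h => hp h.symm
        simp [padc, hp, List.flatMap_cons]
        rw [PySem.Chars.split₀.go.eq_def]
        simp [hs, hp', ih, tokRun]

theorem split₀_pad (cs : List Char) :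
    PySem.Chars.split₀ (cs.flatMap padc) = tokRun cs [] := by
  simpa using go_tok cs [] []

theorem tokfold (cs : List Char) (toks : List (List Char)) (cur : List Char) :
    (if (cs.foldl t9TokStep (toks, cur)).2 ≠ [] then
        (cs.foldl t9TokStep (toks, cur)).1 ++ [(cs.foldl t9TokStep (toks, cur)).2]
      else (cs.foldl t9TokStep (toks, cur)).1) = toks ++ tokRun cs cur := by
  induction cs generalizing toks cur with
  | nil => by_cases h : cur = [] <;> simp [tokRun, h]
  | cons c cs ih =>
    by_cases hs : PySem.Chars.isspace c = true
    · by_cases h : cur = [] <;> simp [t9TokStep, hs, tokRun, h, ih]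
    · by_cases hp : c = '.' ∨ c = ','
      · by_cases h : cur = [] <;> simp [t9TokStep, hs, hp, tokRun, h, ih]
      · simp [t9TokStep, hs, hp, tokRun, ih]

theorem getD_append_length {α : Type} (done : List α) (t : α) (rest : List α) (d : α) :
    (done ++ t :: rest).getD done.length d = t := by
  induction done with
  | nil => rfl
  | cons x xs ih => simpa using ih

theorem getD_append_pred {α : Type} (done : List α) (rest : List α) (d : α) (h : done ≠ []) :
    (done ++ rest).getD (done.length - 1) d = done.getLast h := by
  induction done with
  | nil => exact absurd rfl h
  | cons x xs ih =>
    cases xs with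
    | nil => simp
    | cons y ys =>
      have := ih (by simp)
      simpa [List.getLast] using this

theorem range_peel (a : Int) (n : Nat) :
    PySem.List.pyRange a (a + ((n : Int) + 1)) 1 = a :: PySem.List.pyRange (a + 1) (a + ((n : Int) + 1)) 1 := by
  exact PySem.List.pyRange_one_cons (by omega)

theorem pass1_go (rest done : List (List Char)) (b : Bool)
    (hb : b = (decide (done = []) || decide (done.getLast? = some ['.']))) :
    (PySem.List.pyRange (done.length : Int) ((done.length : Int) + rest.length) 1).foldl
        t9Pass1Step (done ++ rest) = done ++ capPass b rest := by
  induction rest generalizing done b with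
  | nil => simp [capPass]
  | cons t ts ih => ?_
  case cons =>
    have hlen : ((t :: ts).length : Int) = (ts.length : Int) + 1 := by
      push_cast [List.length_cons]; ring
    rw [hlen, range_peel, List.foldl_cons]
    have hget : PySem.List.pyGetD (done ++ t :: ts) (done.length : Int) [] = t := by
      simpa using getD_append_length done t ts []
    have hcond : (((done.length : Int)) = 0 ∨
        PySem.List.pyGetD (done ++ t :: ts) ((done.length : Int) - 1) [] = ['.']) ↔ b = true := by
      by_cases hd : done = []
      · subst hd
        simp [hb]
      · have hpos : 0 < done.length := List.length_pos_iff.mpr hd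
        have hneg : ((done.length : Int) - 1) = ((done.length - 1 : Nat) : Int) := by
          push_cast; omega
        rw [hneg]
        have hgl : PySem.List.pyGetD (done ++ t :: ts) ((done.length - 1 : Nat) : Int) [] =
            done.getLast hd := by
          simpa using getD_append_pred done (t :: ts) [] hd
        rw [hgl]
        have h0 : ¬ ((done.length : Int) = 0) := by
          intro h
          exact hd (List.eq_nil_of_length_eq_zero (by exact_mod_cast h))
        simp [hb, hd, List.getLast?_eq_some_getLast hd]
    have hstep : t9Pass1Step (done ++ t :: ts) (done.length : Int) =
        done ++ (if b then pyCapitalize t else t) :: ts := by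
      unfold t9Pass1Step
      cases hbv : b with
      | true =>
        rw [if_pos (hcond.mpr hbv), hget]
        simp
      | false =>
        rw [if_neg (fun h => by simp [hcond.mp h] at hbv)]
        simp
    rw [hstep]
    set t' := (if b then pyCapitalize t else t) with ht'
    have hih := ih (done := done ++ [t']) (b := decide (t' = ['.'])) (by simp)
    rw [capPass]
    have hdec : decide (t = ['.']) = decide (t' = ['.']) :=
      (decide_eq_decide.mpr (cap_cond_punct b t '.' (Or.inl rfl))).symm
    rw [hdec, ← ht']
    simp only [List.append_assoc, List.singleton_append, List.length_append,
      List.length_singleton] at hih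
    have heq : PySem.List.pyRange ((done.length : Int) + 1)
          ((done.length : Int) + ((ts.length : Int) + 1)) 1 =
        PySem.List.pyRange (((done.length + 1 : Nat)) : Int)
          ((((done.length + 1 : Nat)) : Int) + (ts.length : Int)) 1 := by
      congr 1 <;> push_cast <;> ring
    rw [heq, hih]


theorem pass2_go (rest done : List (List Char)) (b : Bool) (hb : b = decide (done = [])) :
    (PySem.List.pyRange (done.length : Int) ((done.length : Int) + rest.length) 1).foldl
        t9Pass2Step (done ++ rest) = done ++ spacePass b rest := by
  induction rest generalizing done b with
  | nil => simp [spacePass]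
  | cons t ts ih => ?_
  case cons =>
    have hlen : ((t :: ts).length : Int) = (ts.length : Int) + 1 := by
      push_cast [List.length_cons]; ring
    rw [hlen, range_peel, List.foldl_cons]
    have hget : PySem.List.pyGetD (done ++ t :: ts) (done.length : Int) [] = t := by
      simpa using getD_append_length done t ts []
    have hi0 : (((done.length : Int)) = 0) ↔ done = [] := by
      constructor
      · intro h
        exact List.eq_nil_of_length_eq_zero (by exact_mod_cast h)
      · rintro rfl; simp
    have hbf : (b = false) ↔ done ≠ [] := by subst hb; simp
    have hstep : t9Pass2Step (done ++ t :: ts) (done.length : Int) =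
        done ++ (if b = false ∧ t ≠ ['.'] ∧ t ≠ [','] then ' ' :: t else t) :: ts := by
      unfold t9Pass2Step
      rw [hget]
      by_cases hc : b = false ∧ t ≠ ['.'] ∧ t ≠ [',']
      · rw [if_pos ⟨fun h => (hbf.mp hc.1) (hi0.mp h), hc.2.1, hc.2.2⟩, if_pos hc]
        simp
      · rw [if_neg ?_, if_neg hc]
        rintro ⟨h0, h1, h2⟩
        exact hc ⟨hbf.mpr (fun he => h0 (hi0.mpr he)), h1, h2⟩
    rw [hstep]
    set t' := (if b = false ∧ t ≠ ['.'] ∧ t ≠ [','] then ' ' :: t else t) with ht'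
    have hih := ih (done := done ++ [t']) (b := false) (by simp)
    rw [spacePass]
    simp only [List.append_assoc, List.singleton_append, List.length_append,
      List.length_singleton] at hih
    have heq : PySem.List.pyRange ((done.length : Int) + 1)
          ((done.length : Int) + ((ts.length : Int) + 1)) 1 =
        PySem.List.pyRange (((done.length + 1 : Nat)) : Int)
          ((((done.length + 1 : Nat)) : Int) + (ts.length : Int)) 1 := by
      congr 1 <;> push_cast <;> ring
    rw [heq, hih]


theorem flatten_space_cap (ts : List (List Char)) (first b : Bool) :
    (spacePass first (capPass b ts)).flatten = (emitG first b ts).flatten := by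
  induction ts generalizing first b with
  | nil => rfl
  | cons t ts ih =>
    simp only [capPass, spacePass, emitG]
    by_cases hc : first = false ∧ t ≠ ['.'] ∧ t ≠ [',']
    · have hc' : first = false ∧ (if b then pyCapitalize t else t) ≠ ['.'] ∧
          (if b then pyCapitalize t else t) ≠ [','] := by
        refine ⟨hc.1, ?_, ?_⟩
        · simpa [cap_cond_punct b t '.' (Or.inl rfl)] using hc.2.1
        · simpa [cap_cond_punct b t ',' (Or.inr rfl)] using hc.2.2
      simp [hc, hc', ih]
    · have hc' : ¬ (first = false ∧ (if b then pyCapitalize t else t) ≠ ['.'] ∧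
          (if b then pyCapitalize t else t) ≠ [',']) := by
        rintro ⟨ha, hb, hcc⟩
        exact hc ⟨ha, fun he => hb ((cap_cond_punct b t '.' (Or.inl rfl)).mpr he),
          fun he => hcc ((cap_cond_punct b t ',' (Or.inr rfl)).mpr he)⟩
      simp [hc, hc', ih]


theorem emitfold (ts : List (List Char)) (parts : List (List Char)) (prev : Option (List Char)) :
    (ts.foldl t9EmitStep (parts, prev)).1 =
      parts ++ emitG (decide (prev = none)) (decide (prev = none ∨ prev = some ['.'])) ts := by
  induction ts generalizing parts prev with
  | nil => simp [emitG]
  | cons t ts ih =>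
    cases prev with
    | none => simp [t9EmitStep, emitG, ih]
    | some p =>
      by_cases hp : p = ['.']
      · by_cases h1 : t = ['.'] <;> by_cases h2 : t = [','] <;>
          simp_all [t9EmitStep, emitG]
      · by_cases h1 : t = ['.'] <;> by_cases h2 : t = [','] <;>
          simp_all [t9EmitStep, emitG]


theorem join_nil_flatten (parts : List (List Char)) :
    PySem.Chars.join [] parts = parts.flatten := by
  induction parts with
  | nil => rfl
  | cons t ts ih =>
    cases ts with
    | nil => simp [PySem.Chars.join, List.intercalate]
    | cons u us =>
      rw [PySem.Chars.join_cons_cons] at *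
      simp_all [PySem.Chars.join, List.intercalate]

theorem core_eq (cs : List Char) : t9Core cs = t9AltCore cs := by
  simp only [t9Core, t9AltCore]
  rw [pad_eq, List.nil_append, split₀_pad]
  rw [tokfold cs [] [], List.nil_append]
  set l := tokRun cs [] with hl
  have h1 : (PySem.List.pyRange 0 (PySem.List.len l) 1).foldl t9Pass1Step l =
      capPass true l := by
    have := pass1_go l [] true (by simp)
    simpa [PySem.List.len_eq] using this
  rw [h1]
  have h2 : (PySem.List.pyRange 0 (PySem.List.len (capPass true l)) 1).foldl t9Pass2Step
      (capPass true l) = spacePass true (capPass true l) := by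
    have := pass2_go (capPass true l) [] true (by simp)
    simpa [PySem.List.len_eq] using this
  rw [h2]
  rw [emitfold l [] none, List.nil_append]
  rw [join_nil_flatten, join_nil_flatten]
  simpa using flatten_space_cap l true true

-- ===== VERDICT (by name: the statement is the Claim_ definition above) =====
theorem t9_spec : Claim_equal_t9 := by
  intro text _
  show t9 text = t9_alt text
  unfold t9 t9_alt
  rw [core_eq]
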